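-- pv_equiv track=rewrite | github.com/seungminleeee/AlgoStudy | jun/2025.01/250102_1213.펠린드롬 만들기.py | solve
-- ===== SOURCE A (Python) =====
-- from collections import Counter
--
-- def solve(name):
--     count = Counter(name)
--     odd_count = 0
--     odd_char = ''
--     for char, cnt in count.items():
--         if cnt % 2 != 0:
--             odd_count += 1
--             odd_char = char
--             if odd_count > 1:
--                 return "I'm Sorry Hansoo"
--
--     half_name = []
--     for char in sorted(count.keys()):
--         half_name.append(char * (count[char] // 2))
--
--     left_half = ''.join(half_name)
--     if odd_count == 1:
--         return left_half + odd_char + left_half[::-1]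
--     else:
--         return left_half + left_half[::-1]
-- ===== SOURCE B (Python) =====
-- def solve(name):
--     s = sorted(name)
--     n = len(s)
--     left = []
--     mid = ''
--     odd = 0
--     i = 0
--     while i < n:
--         j = i
--         while j < n and s[j] == s[i]:
--             j += 1
--         run = j - i
--         if run % 2 == 1:
--             odd += 1
--             if odd > 1:
--                 return "I'm Sorry Hansoo"
--             mid = s[i]
--         left.append(s[i] * (run // 2))
--         i = j
--     lh = ''.join(left)
--     return lh + mid + lh[::-1]
-- ===== Notes on version B (the rewrite author's own statement) =====
-- stated objective: alternative
-- what changed: Replaces the Counter-plus-sorted-keys pipeline by a single sort of the whole string followed by one run-length scan that builds the left half, the middle character and the odd counter in the same pass.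
import Mathlib
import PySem

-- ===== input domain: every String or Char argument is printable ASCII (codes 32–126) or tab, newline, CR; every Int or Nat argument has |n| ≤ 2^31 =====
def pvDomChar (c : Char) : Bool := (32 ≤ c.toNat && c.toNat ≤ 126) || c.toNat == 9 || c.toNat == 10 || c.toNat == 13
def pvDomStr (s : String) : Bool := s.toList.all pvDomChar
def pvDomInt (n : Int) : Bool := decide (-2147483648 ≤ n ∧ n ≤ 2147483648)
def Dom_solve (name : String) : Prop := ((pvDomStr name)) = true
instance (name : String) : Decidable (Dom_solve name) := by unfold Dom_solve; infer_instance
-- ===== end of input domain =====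

-- B replaces A's Counter-plus-sorted-keys pipeline by one sort of the whole string and a single
-- run-length scan building left half, middle char and odd counter together (alternative, not faster).

-- ===== PORT A =====
-- the for-loop over count.items() with early return "I'm Sorry Hansoo" (none = that return)
def solveLoopA : List (Char × Int) → Int → List Char → Option (Int × List Char)
  | [], oddCount, oddChar => some (oddCount, oddChar)
  | (c, cnt) :: rest, oddCount, oddChar =>
    if PySem.Int.mod cnt 2 ≠ 0 then
      if oddCount + 1 > 1 then none
      else solveLoopA rest (oddCount + 1) [c]
    else solveLoopA rest oddCount oddChar

def solve (name : String) : String :=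
  let count := PySem.Dict.counter name.toList
  match solveLoopA count.items 0 [] with
  | none => "I'm Sorry Hansoo"
  | some (oddCount, oddChar) =>
    let halfName := (PySem.List.sorted count.keys (fun x => x) false).map
      (fun c => List.replicate (PySem.Int.floordiv (count.getD c 0) 2).toNat c)
    let leftHalf := halfName.flatten
    if oddCount = 1 then String.mk (leftHalf ++ oddChar ++ leftHalf.reverse)
    else String.mk (leftHalf ++ leftHalf.reverse)

-- ===== PORT B =====
-- the while-loop over the sorted characters: one run of equal chars per step
def solveLoopB : List Char → List (List Char) → List Char → Int → Option (List (List Char) × List Char)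
  | [], left, mid, _ => some (left, mid)
  | c :: rest, left, mid, odd =>
    let run := 1 + (rest.takeWhile (fun d => d == c)).length
    let rest' := rest.dropWhile (fun d => d == c)
    if run % 2 = 1 then
      if odd + 1 > 1 then none
      else solveLoopB rest' (left ++ [List.replicate (run / 2) c]) [c] (odd + 1)
    else solveLoopB rest' (left ++ [List.replicate (run / 2) c]) mid odd
termination_by l => l.length
decreasing_by all_goals exact Nat.lt_succ_of_le (List.length_dropWhile_le _ _)

def solve_alt (name : String) : String :=
  match solveLoopB (PySem.List.sorted name.toList (fun x => x) false) [] [] 0 with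
  | none => "I'm Sorry Hansoo"
  | some (left, mid) =>
    let lh := left.flatten
    String.mk (lh ++ mid ++ lh.reverse)

-- ===== PRECONDITION & SPEC =====
def Spec_solve (name : String) (out : String) : Prop := out = solve_alt name
instance (name : String) (out : String) : Decidable (Spec_solve name out) := by unfold Spec_solve; infer_instance

-- ===== CLAIM (what is proved, stated in full; the proofs are below) =====
def Claim_equal_solve : Prop := ∀ (name : String), Dom_solve name → Spec_solve name (solve name)

-- ===== LEMMAS AND PROOFS =====

theorem loopA_spec (cnt : Char → Nat) :
    ∀ (l : List Char) (oc : Int) (och : List Char), (oc = 0 ∨ oc = 1) →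
    solveLoopA (l.map (fun k => (k, (cnt k : Int)))) oc och =
      (if oc + ((l.filter (fun c => cnt c % 2 = 1)).length : Int) > 1 then none
       else some (oc + ((l.filter (fun c => cnt c % 2 = 1)).length : Int),
                  ((l.filter (fun c => cnt c % 2 = 1)).getLast?).elim och (fun c => [c]))) := by
  intro l
  induction l with
  | nil =>
    intro oc och hoc
    simp only [List.map_nil, List.filter_nil, solveLoopA, List.length_nil, Nat.cast_zero,
      add_zero, List.getLast?_nil, Option.elim_none]
    rw [if_neg (by omega)]
  | cons c t ih =>
    intro oc och hoc
    have hmod : PySem.Int.mod ((cnt c : Nat) : Int) 2 = ((cnt c % 2 : Nat) : Int) := by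
      rw [PySem.Int.mod_eq_emod_of_pos (by omega)]; omega
    by_cases hodd : cnt c % 2 = 1
    · have hf : List.filter (fun c => decide (cnt c % 2 = 1)) (c :: t)
          = c :: List.filter (fun c => decide (cnt c % 2 = 1)) t := by simp [hodd]
      simp only [List.map_cons, solveLoopA, hmod, hodd, hf]
      rw [if_pos (by norm_num)]
      rcases hoc with h0 | h1
      · subst h0
        rw [if_neg (by omega), zero_add, ih 1 [c] (Or.inr rfl)]
        rcases hft : List.filter (fun c => decide (cnt c % 2 = 1)) t with _ | ⟨a, t'⟩
        · simp
        · rw [if_pos (by simp), if_pos (by simp)]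
      · subst h1
        rw [if_pos (by omega), if_pos (by simp)]
    · have hodd0 : cnt c % 2 = 0 := by omega
      have hf : List.filter (fun c => decide (cnt c % 2 = 1)) (c :: t)
          = List.filter (fun c => decide (cnt c % 2 = 1)) t := by simp [hodd]
      simp only [List.map_cons, solveLoopA, hmod, hodd0, hf]
      rw [if_neg (by norm_num)]
      exact ih oc och hoc

theorem runSplit (c : Char) : ∀ (m : Nat) (r : List Char), (∀ x ∈ r, x ≠ c) →
    (List.replicate m c ++ r).takeWhile (fun d => d == c) = List.replicate m c ∧
    (List.replicate m c ++ r).dropWhile (fun d => d == c) = r := by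
  intro m
  induction m with
  | zero =>
    intro r h
    cases r with
    | nil => simp
    | cons x xs =>
      have hx : (x == c) = false := by simpa using h x (by simp)
      simp [hx]
  | succ m ih =>
    intro r h
    simp [List.replicate_succ, (ih r h).1, (ih r h).2]

theorem flatMap_ne (c : Char) (t : List Char) (cnt : Char → Nat) (hlt : ∀ d ∈ t, c < d) :
    ∀ x ∈ t.flatMap (fun d => List.replicate (cnt d) d), x ≠ c := by
  intro x hx
  rcases List.mem_flatMap.mp hx with ⟨d, hd, hxd⟩
  rw [List.eq_of_mem_replicate hxd]
  exact ne_of_gt (hlt d hd)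

theorem loopB_spec (cnt : Char → Nat) :
    ∀ (l : List Char), l.Pairwise (· < ·) → (∀ c ∈ l, 0 < cnt c) →
    ∀ (left : List (List Char)) (mid : List Char) (odd : Int), (odd = 0 ∨ odd = 1) →
    solveLoopB (l.flatMap (fun c => List.replicate (cnt c) c)) left mid odd =
      (if odd + ((l.filter (fun c => cnt c % 2 = 1)).length : Int) > 1 then none
       else some (left ++ l.map (fun c => List.replicate (cnt c / 2) c),
                  ((l.filter (fun c => cnt c % 2 = 1)).getLast?).elim mid (fun c => [c]))) := by
  intro l
  induction l with
  | nil =>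
    intro _ _ left mid odd hodd
    simp only [List.flatMap_nil, List.filter_nil, solveLoopB, List.length_nil, Nat.cast_zero,
      add_zero, List.map_nil, List.append_nil, List.getLast?_nil, Option.elim_none]
    rw [if_neg (by omega)]
  | cons c t ih =>
    intro hpw hpos left mid odd hodd
    have hlt : ∀ d ∈ t, c < d := (List.pairwise_cons.mp hpw).1
    have hpw' : t.Pairwise (· < ·) := (List.pairwise_cons.mp hpw).2
    have hpos' : ∀ d ∈ t, 0 < cnt d := fun d hd => hpos d (by simp [hd])
    have hm : 0 < cnt c := hpos c (by simp)
    have hsplit := runSplit c (cnt c - 1) (t.flatMap fun d => List.replicate (cnt d) d)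
      (flatMap_ne c t cnt hlt)
    have harg : (c :: t).flatMap (fun d => List.replicate (cnt d) d)
        = c :: (List.replicate (cnt c - 1) c ++ t.flatMap (fun d => List.replicate (cnt d) d)) := by
      rw [List.flatMap_cons]
      conv_lhs => rw [show cnt c = (cnt c - 1) + 1 from by omega]
      simp [List.replicate_succ]
    rw [harg]
    simp only [solveLoopB, hsplit.1, hsplit.2, List.length_replicate]
    rw [show 1 + (cnt c - 1) = cnt c from by omega]
    by_cases hodd2 : cnt c % 2 = 1
    · have hf : List.filter (fun c => decide (cnt c % 2 = 1)) (c :: t)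
          = c :: List.filter (fun c => decide (cnt c % 2 = 1)) t := by simp [hodd2]
      simp only [List.map_cons, hf]
      rw [if_pos hodd2]
      rcases hodd with h0 | h1
      · subst h0
        rw [if_neg (by omega), zero_add,
          ih hpw' hpos' (left ++ [List.replicate (cnt c / 2) c]) [c] 1 (Or.inr rfl)]
        rcases hft : List.filter (fun c => decide (cnt c % 2 = 1)) t with _ | ⟨a, t'⟩
        · simp
        · rw [if_pos (by simp), if_pos (by simp)]
      · subst h1
        rw [if_pos (by omega), if_pos (by simp)]
    · have hf : List.filter (fun c => decide (cnt c % 2 = 1)) (c :: t)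
          = List.filter (fun c => decide (cnt c % 2 = 1)) t := by simp [hodd2]
      simp only [List.map_cons, hf]
      rw [if_neg hodd2,
        ih hpw' hpos' (left ++ [List.replicate (cnt c / 2) c]) mid odd hodd]
      simp

theorem count_flatMap_replicate (cnt : Char → Nat) :
    ∀ (l : List Char), l.Nodup → ∀ a : Char,
    (l.flatMap fun c => List.replicate (cnt c) c).count a = if a ∈ l then cnt a else 0 := by
  intro l
  induction l with
  | nil => simp
  | cons c t ih =>
    intro hnd a
    simp only [List.flatMap_cons, List.count_append, List.count_replicate]
    rw [ih hnd.of_cons a]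
    by_cases hac : a = c
    · subst hac
      have hat : a ∉ t := (List.nodup_cons.mp hnd).1
      simp [hat]
    · simp [hac, Ne.symm hac]

theorem pairwise_flatMap_replicate (cnt : Char → Nat) :
    ∀ (l : List Char), l.Pairwise (· < ·) →
    (l.flatMap fun c => List.replicate (cnt c) c).Pairwise (· ≤ ·) := by
  intro l
  induction l with
  | nil => simp
  | cons c t ih =>
    intro hpw
    rcases List.pairwise_cons.mp hpw with ⟨hlt, hpw'⟩
    rw [List.flatMap_cons]
    apply List.pairwise_append.mpr
    refine ⟨?_, ih hpw', ?_⟩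
    · apply List.pairwise_replicate.mpr
      exact Or.inr le_rfl
    · intro x hx y hy
      rw [List.eq_of_mem_replicate hx]
      rcases List.mem_flatMap.mp hy with ⟨d, hd, hyd⟩
      rw [List.eq_of_mem_replicate hyd]
      exact le_of_lt (hlt d hd)

theorem sorted_flat (xs : List Char) :
    PySem.List.sorted xs (fun x => x) false =
      (PySem.List.sorted (PySem.Set.ofList xs) (fun x => x) false).flatMap
        (fun c => List.replicate (xs.count c) c) := by
  have hnd : (PySem.List.sorted (PySem.Set.ofList xs) (fun x => x) false).Nodup :=
    (PySem.List.sorted_perm (PySem.Set.ofList xs) (fun x => x) false).nodup_iff.mpr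
      (PySem.Set.nodup_ofList xs)
  apply PySem.List.sorted_id_eq_of_perm_of_pairwise
  · apply List.perm_iff_count.mpr
    intro a
    rw [count_flatMap_replicate (fun c => xs.count c) _ hnd a]
    by_cases ha : a ∈ PySem.List.sorted (PySem.Set.ofList xs) (fun x => x) false
    · rw [if_pos ha]
    · rw [if_neg ha]
      have hax : a ∉ xs := by
        intro hax
        exact ha (by
          rw [PySem.List.mem_sorted]
          exact (PySem.Set.mem_ofList _ _).mpr hax)
      exact (List.count_eq_zero.mpr hax).symm
  · exact pairwise_flatMap_replicate _ _ (PySem.List.sorted_ofList_pairwise_lt xs)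

-- ===== VERDICT (by name: the statement is the Claim_ definition above) =====
theorem solve_spec : Claim_equal_solve := by
  unfold Claim_equal_solve Spec_solve
  intro name _
  have hfd : ∀ n : Nat, (PySem.Int.floordiv ((n : Nat) : Int) 2).toNat = n / 2 := by
    intro n
    rw [PySem.Int.floordiv_eq_ediv_of_pos (by omega)]
    omega
  have hposL : ∀ c ∈ PySem.List.sorted (PySem.Set.ofList name.toList) (fun x => x) false,
      0 < name.toList.count c := by
    intro c hc
    rw [PySem.List.mem_sorted] at hc
    exact List.count_pos_iff.mpr ((PySem.Set.mem_ofList _ _).mp hc)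
  simp only [solve, solve_alt]
  rw [PySem.Dict.items_counter, PySem.Dict.keys_counter]
  rw [loopA_spec (fun c => name.toList.count c) _ 0 [] (Or.inl rfl)]
  rw [sorted_flat name.toList]
  rw [loopB_spec (fun c => name.toList.count c) _
    (PySem.List.sorted_ofList_pairwise_lt name.toList) hposL [] [] 0 (Or.inl rfl)]
  have hmapf : (fun c => List.replicate
        (PySem.Int.floordiv ((PySem.Dict.counter name.toList).getD c 0) 2).toNat c)
      = fun c => List.replicate (name.toList.count c / 2) c := by
    funext c
    rw [PySem.Dict.getD_counter, hfd]
  rw [hmapf]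
  have hperm : List.Perm
      ((PySem.List.sorted (PySem.Set.ofList name.toList) (fun x => x) false).filter
        (fun c => decide (name.toList.count c % 2 = 1)))
      ((PySem.Set.ofList name.toList).filter (fun c => decide (name.toList.count c % 2 = 1))) :=
    (PySem.List.sorted_perm (PySem.Set.ofList name.toList) (fun x => x) false).filter _
  have hlen := hperm.length_eq
  rcases hF : (PySem.List.sorted (PySem.Set.ofList name.toList) (fun x => x) false).filter
      (fun c => decide (name.toList.count c % 2 = 1)) with _ | ⟨a, t⟩
  · rw [hF] at hperm hlen
    have hM : (PySem.Set.ofList name.toList).filter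
        (fun c => decide (name.toList.count c % 2 = 1)) = [] := hperm.symm.eq_nil
    rw [hM]
    simp only [List.length_nil, Nat.cast_zero, add_zero, List.getLast?_nil,
      Option.elim_none, List.nil_append]
    rw [if_neg (by omega), if_neg (by omega)]
    simp
  · rcases t with _ | ⟨b, t'⟩
    · rw [hF] at hperm hlen
      have hM : (PySem.Set.ofList name.toList).filter
          (fun c => decide (name.toList.count c % 2 = 1)) = [a] :=
        List.perm_singleton.mp hperm.symm
      rw [hM]
      simp only [List.length_cons, List.length_nil, Nat.cast_one, zero_add,
        List.getLast?_singleton, Option.elim_some, List.nil_append]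
      rw [if_neg (by omega), if_neg (by omega)]
      simp
    · rw [hF] at hperm hlen
      have hlM : 2 ≤ ((PySem.Set.ofList name.toList).filter
          (fun c => decide (name.toList.count c % 2 = 1))).length := by
        rw [← hlen]; simp
      rw [if_pos (by omega), if_pos (by simp)]
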